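-- pv_equiv track=rewrite | github.com/shsargordi/doseCalculation | computeScore.py | select_ctv_variant
-- ===== SOURCE A (Python) =====
-- def select_ctv_variant(structlist, base):
--     """
--     Select the most suitable variant for a given CTV base name (CTV_1, CTV_2, etc.)
--     Priority: exact match > highest dose suffix > longest name
--     """
--     candidates = [s for s in structlist if s.startswith(base)]
--     if not candidates:
--         return None
--
--     # Prioritize exact match
--     exact = [s for s in candidates if s == f"{base}.nii.gz"]
--     if exact:
--         return exact[0]
--
--     # Else sort by preferred suffix
--     # Example scoring: 70 > 66 > rest
--     def score(name):
--         if '70' in name: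
--             return 3
--         elif '66' in name:
--             return 2
--         elif any(c in name for c in ['A', 'B']):
--             return 1
--         return 0
--
--     candidates.sort(key=score, reverse=True)
--     return candidates[0] if candidates else None
-- ===== SOURCE B (Python) =====
-- def select_ctv_variant(structlist, base):
--     """
--     Select the most suitable variant for a given CTV base name (CTV_1, CTV_2, etc.)
--     Priority: exact match > highest dose suffix > longest name
--     """
--     candidates = [s for s in structlist if s.startswith(base)]
--     if not candidates:
--         return None
--     target = f"{base}.nii.gz"
--     predicates = (
--         lambda n: n == target,
--         lambda n: '70' in n,
--         lambda n: '66' in n,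
--         lambda n: 'A' in n or 'B' in n,
--     )
--     for pred in predicates:
--         for name in candidates:
--             if pred(name):
--                 return name
--     return candidates[0]
-- ===== Notes on version B (the rewrite author's own statement) =====
-- stated objective: simpler
-- what changed: Replaced score-every-candidate plus stable reverse sort (and the separate exact-match filter pass) with a single ordered list of priority predicates scanned left-to-right, returning the first candidate matching the highest-priority predicate.
import Mathlib
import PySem

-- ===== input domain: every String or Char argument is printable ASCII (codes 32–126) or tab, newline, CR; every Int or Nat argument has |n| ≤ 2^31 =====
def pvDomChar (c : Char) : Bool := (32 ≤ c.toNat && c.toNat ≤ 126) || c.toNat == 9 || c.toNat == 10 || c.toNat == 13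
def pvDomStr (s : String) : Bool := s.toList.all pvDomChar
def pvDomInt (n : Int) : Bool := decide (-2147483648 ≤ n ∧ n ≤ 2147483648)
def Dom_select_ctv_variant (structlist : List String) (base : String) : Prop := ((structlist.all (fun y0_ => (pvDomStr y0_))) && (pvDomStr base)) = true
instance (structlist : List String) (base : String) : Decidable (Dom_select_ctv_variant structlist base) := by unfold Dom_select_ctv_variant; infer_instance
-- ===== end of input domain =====

-- B replaces A's score-and-stable-reverse-sort selection with an ordered priority-predicate scan; objective: simpler.


-- ===== PORT A =====
-- the inner 'def score(name)' helper of A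
def pvScore (name : String) : Int :=
  if PySem.Str.isIn "70" name then 3
  else if PySem.Str.isIn "66" name then 2
  else if ["A", "B"].any (fun c => PySem.Str.isIn c name) then 1
  else 0

def select_ctv_variant (structlist : List String) (base : String) : Option String :=
  let candidates := structlist.filter (fun s => PySem.Str.startswith s base)
  if candidates = [] then none
  else
    let exact := candidates.filter (fun s => s == base ++ ".nii.gz")
    if exact ≠ [] then exact.head?
    else
      let sortedc := PySem.List.sorted candidates pvScore true
      if sortedc ≠ [] then sortedc.head? else none

-- ===== PORT B =====
def select_ctv_variant_alt (structlist : List String) (base : String) : Option String :=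
  let candidates := structlist.filter (fun s => PySem.Str.startswith s base)
  if candidates = [] then none
  else
    let target := base ++ ".nii.gz"
    match candidates.find? (fun n => n == target) with
    | some n => some n
    | none =>
      match candidates.find? (fun n => PySem.Str.isIn "70" n) with
      | some n => some n
      | none =>
        match candidates.find? (fun n => PySem.Str.isIn "66" n) with
        | some n => some n
        | none =>
          match candidates.find? (fun n => PySem.Str.isIn "A" n || PySem.Str.isIn "B" n) with
          | some n => some n
          | none => candidates.head?

-- ===== PRECONDITION & SPEC =====
def Spec_select_ctv_variant (structlist : List String) (base : String) (out : Option String) : Prop := out = select_ctv_variant_alt structlist base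
instance (structlist : List String) (base : String) (out : Option String) : Decidable (Spec_select_ctv_variant structlist base out) := by unfold Spec_select_ctv_variant; infer_instance

-- ===== CLAIM (what is proved, stated in full; the proofs are below) =====
def Claim_equal_select_ctv_variant : Prop := ∀ (structlist : List String) (base : String), Dom_select_ctv_variant structlist base → Spec_select_ctv_variant structlist base (select_ctv_variant structlist base)

-- ===== LEMMAS AND PROOFS =====

-- running "first maximum" step of a stable reverse sort by pvScore
def pvStep (m x : String) : String := if pvScore m < pvScore x then x else m

-- the priority-tier chain B computes on a nonempty candidate list c :: rest
def pvTier (c : String) (rest : List String) : String :=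
  match (c :: rest).find? (fun n => PySem.Str.isIn "70" n) with
  | some n => n
  | none =>
    match (c :: rest).find? (fun n => PySem.Str.isIn "66" n) with
    | some n => n
    | none =>
      match (c :: rest).find? (fun n => PySem.Str.isIn "A" n || PySem.Str.isIn "B" n) with
      | some n => n
      | none => c

theorem pvHeadFold (rest : List String) : ∀ (y : String) (ys : List String),
    ∃ t, rest.foldl (fun acc x => PySem.List.insertBy (fun a b => decide (pvScore b < pvScore a)) x acc) (y :: ys)
      = rest.foldl pvStep y :: t := by
  induction rest with
  | nil => intro y ys; exact ⟨ys, rfl⟩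
  | cons x xs ih =>
    intro y ys
    simp only [List.foldl_cons]
    by_cases h : pvScore y < pvScore x
    · have : PySem.List.insertBy (fun a b => decide (pvScore b < pvScore a)) x (y :: ys) = x :: y :: ys := by
        simp [PySem.List.insertBy, h]
      rw [this]
      simpa [pvStep, h] using ih x (y :: ys)
    · have : PySem.List.insertBy (fun a b => decide (pvScore b < pvScore a)) x (y :: ys)
        = y :: PySem.List.insertBy (fun a b => decide (pvScore b < pvScore a)) x ys := by
        simp [PySem.List.insertBy, h]
      rw [this]
      simpa [pvStep, h] using ih y (PySem.List.insertBy (fun a b => decide (pvScore b < pvScore a)) x ys)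

theorem pvFoldTier (rest : List String) : ∀ (c : String), rest.foldl pvStep c = pvTier c rest := by
  induction rest with
  | nil =>
    intro c
    by_cases h3 : PySem.Str.isIn "70" c <;>
    by_cases h2 : PySem.Str.isIn "66" c <;>
    by_cases hA : PySem.Str.isIn "A" c <;>
    by_cases hB : PySem.Str.isIn "B" c <;>
      simp_all [pvTier, List.find?]
  | cons x xs ih =>
    intro c
    simp only [List.foldl_cons]
    rw [ih (pvStep c x)]
    by_cases h3c : PySem.Str.isIn "70" c <;>
    by_cases h2c : PySem.Str.isIn "66" c <;>
    by_cases h1c : (PySem.Str.isIn "A" c || PySem.Str.isIn "B" c) = true <;>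
    by_cases h3x : PySem.Str.isIn "70" x <;>
    by_cases h2x : PySem.Str.isIn "66" x <;>
    by_cases h1x : (PySem.Str.isIn "A" x || PySem.Str.isIn "B" x) = true <;>
      simp_all [pvStep, pvScore, pvTier, List.find?_cons]

-- ===== VERDICT (by name: the statement is the Claim_ definition above) =====
theorem select_ctv_variant_spec : Claim_equal_select_ctv_variant := by
  intro structlist base _
  unfold Spec_select_ctv_variant select_ctv_variant select_ctv_variant_alt
  cases hc : structlist.filter (fun s => PySem.Str.startswith s base) with
  | nil => simp
  | cons c rest =>
    simp only [reduceCtorEq, if_neg, ne_eq, not_false_eq_true]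
    rw [← List.head?_filter]
    cases hf : List.filter (fun s => s == base ++ ".nii.gz") (c :: rest) with
    | cons e es => simp
    | nil =>
      simp only [not_true_eq_false, if_false, List.head?_nil]
      have hs : PySem.List.sorted (c :: rest) pvScore true ≠ [] := by
        simp [PySem.List.sorted_eq_nil_iff]
      rw [if_pos hs]
      rw [PySem.List.sorted_rev_eq_foldl_insertBy]
      simp only [List.foldl_cons]
      have hins : PySem.List.insertBy (fun a b => decide (pvScore b < pvScore a)) c ([] : List String) = [c] := by
        simp [PySem.List.insertBy]
      rw [hins]
      obtain ⟨t, ht⟩ := pvHeadFold rest c []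
      rw [ht]
      rw [pvFoldTier rest c]
      simp only [List.head?_cons]
      unfold pvTier
      cases List.find? (fun n => PySem.Str.isIn "70" n) (c :: rest) <;>
      cases List.find? (fun n => PySem.Str.isIn "66" n) (c :: rest) <;>
      cases List.find? (fun n => PySem.Str.isIn "A" n || PySem.Str.isIn "B" n) (c :: rest) <;> rfl
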